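-- pv_equiv track=rewrite | github.com/George121380/LEAP | experiments/virtualhome/VH_scripts/debug.py | split_definitions_and_behaviors
-- ===== SOURCE A (Python) =====
-- def split_definitions_and_behaviors(code_block: str) -> dict:
--     """
--     This function splits a block of code into individual function definitions and behaviors
--     based on 'def' and 'behavior' keywords.
--     """
--     definitions = []
--     behaviors = []
--     current_block = []
--     current_type = None
--
--     for line in code_block.splitlines():
--         stripped_line = line.strip()
--
--         # Detect the start of a new function definition
--         if stripped_line.startswith("def"):
--             if current_block:
--                 if current_type == "def":
--                     definitions.append("\n".join(current_block))
--                 elif current_type == "behavior":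
--                     behaviors.append("\n".join(current_block))
--             current_block = [line]
--             current_type = "def"
--         # Detect the start of a new behavior definition
--         elif stripped_line.startswith("behavior"):
--             if current_block:
--                 if current_type == "def":
--                     definitions.append("\n".join(current_block))
--                 elif current_type == "behavior":
--                     behaviors.append("\n".join(current_block))
--             current_block = [line]
--             current_type = "behavior"
--         else:
--             current_block.append(line)
--
--     # Add the last block of code
--     if current_block:
--         if current_type == "def":
--             definitions.append("\n".join(current_block))
--         elif current_type == "behavior":
--             behaviors.append("\n".join(current_block))
--
--     return {"functions": definitions, "behaviors": behaviors}
-- ===== SOURCE B (Python) =====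
-- def split_definitions_and_behaviors(code_block: str) -> dict:
--     """
--     Split a block of code into function/behavior blocks: find the boundary
--     lines (stripped form starts with 'def'/'behavior'), then cut the line list
--     into segments from each boundary to the next; lines before the first
--     boundary are discarded.
--     """
--     lines = code_block.splitlines()
--
--     def kind(line):
--         s = line.strip()
--         if s.startswith("def"):
--             return "functions"
--         if s.startswith("behavior"):
--             return "behaviors"
--         return None
--
--     def next_boundary(j):
--         while j < len(lines) and kind(lines[j]) is None:
--             j += 1
--         return j
--
--     result = {"functions": [], "behaviors": []}
--     i = next_boundary(0)
--     while i < len(lines):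
--         j = next_boundary(i + 1)
--         result[kind(lines[i])].append("\n".join(lines[i:j]))
--         i = j
--     return result
-- ===== Notes on version B (the rewrite author's own statement) =====
-- stated objective: alternative
-- what changed: Replaces A's running current_block/current_type accumulator state machine with a boundary-index scan: find each 'def'/'behavior' boundary line, slice the line list from one boundary to the next, and append the joined slice to the bucket named by the boundary's kind.
import Mathlib
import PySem

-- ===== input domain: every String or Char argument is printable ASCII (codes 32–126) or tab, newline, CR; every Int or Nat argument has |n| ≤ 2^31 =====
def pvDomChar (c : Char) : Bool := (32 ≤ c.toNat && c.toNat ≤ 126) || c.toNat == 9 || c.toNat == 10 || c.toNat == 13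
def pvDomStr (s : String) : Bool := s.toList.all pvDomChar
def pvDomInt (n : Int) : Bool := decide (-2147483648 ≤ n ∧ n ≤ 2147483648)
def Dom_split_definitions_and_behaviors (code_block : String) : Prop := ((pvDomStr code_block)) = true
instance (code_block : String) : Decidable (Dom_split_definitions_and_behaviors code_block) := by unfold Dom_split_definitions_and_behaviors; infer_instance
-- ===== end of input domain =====

-- B replaces A's running-block accumulator with a boundary-index scan: find each
-- boundary line, slice the line list from boundary to boundary, and append the
-- joined segment by the boundary's kind (objective: alternative decomposition).


-- ===== PORT A =====
-- the repeated 'if current_block: … append("\n".join(current_block))' code of A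
def pvFlushA (d b cur : List String) (ty : Option Bool) : List String × List String :=
  if cur ≠ [] then
    match ty with
    | some true => (d ++ [PySem.Str.join "\n" cur], b)
    | some false => (d, b ++ [PySem.Str.join "\n" cur])
    | none => (d, b)
  else (d, b)

-- one iteration of A's for-loop; state = (definitions, behaviors, current_block, current_type)
def pvStepA (st : List String × List String × List String × Option Bool) (line : String) :
    List String × List String × List String × Option Bool :=
  let stripped := PySem.Str.strip line
  if PySem.Str.startswith stripped "def" then
    let fl := pvFlushA st.1 st.2.1 st.2.2.1 st.2.2.2
    (fl.1, fl.2, [line], some true)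
  else if PySem.Str.startswith stripped "behavior" then
    let fl := pvFlushA st.1 st.2.1 st.2.2.1 st.2.2.2
    (fl.1, fl.2, [line], some false)
  else (st.1, st.2.1, st.2.2.1 ++ [line], st.2.2.2)

def split_definitions_and_behaviors (code_block : String) : List (String × List String) :=
  let st := (PySem.Str.splitlines code_block).foldl pvStepA ([], [], [], none)
  let fl := pvFlushA st.1 st.2.1 st.2.2.1 st.2.2.2
  [("functions", fl.1), ("behaviors", fl.2)]

-- ===== PORT B =====
-- kind(line): some true = "functions" boundary, some false = "behaviors" boundary
def pvKind (line : String) : Option Bool :=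
  let s := PySem.Str.strip line
  if PySem.Str.startswith s "def" then some true
  else if PySem.Str.startswith s "behavior" then some false
  else none

-- next_boundary(j): first index ≥ j whose line is a boundary (or len(lines))
def pvNextBoundary (lines : List String) (j : Nat) : Nat :=
  if h : j < lines.length then
    if pvKind lines[j] = none then pvNextBoundary lines (j + 1) else j
  else j
termination_by lines.length - j

theorem pvNextBoundary_ge (lines : List String) (j : Nat) : j ≤ pvNextBoundary lines j := by
  unfold pvNextBoundary
  split
  · split
    · exact le_trans (Nat.le_succ j) (pvNextBoundary_ge lines (j + 1))
    · exact le_refl j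
  · exact le_refl j
termination_by lines.length - j

-- B's main while-loop; lines[i:j] with 0 ≤ i ≤ j ported exactly as drop/take
def pvLoopB (lines : List String) (i : Nat) (fs bs : List String) : List String × List String :=
  if h : i < lines.length then
    let j := pvNextBoundary lines (i + 1)
    let block := PySem.Str.join "\n" ((lines.drop i).take (j - i))
    if pvKind lines[i] = some true then pvLoopB lines j (fs ++ [block]) bs
    else pvLoopB lines j fs (bs ++ [block])
  else (fs, bs)
termination_by lines.length - i
decreasing_by
  all_goals (have := pvNextBoundary_ge lines (i + 1); omega)

def split_definitions_and_behaviors_alt (code_block : String) : List (String × List String) :=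
  let lines := PySem.Str.splitlines code_block
  let r := pvLoopB lines (pvNextBoundary lines 0) [] []
  [("functions", r.1), ("behaviors", r.2)]

-- ===== PRECONDITION & SPEC =====
def Spec_split_definitions_and_behaviors (code_block : String) (out : List (String × List String)) : Prop := out = split_definitions_and_behaviors_alt code_block
instance (code_block : String) (out : List (String × List String)) : Decidable (Spec_split_definitions_and_behaviors code_block out) := by unfold Spec_split_definitions_and_behaviors; infer_instance

-- ===== CLAIM (what is proved, stated in full; the proofs are below) =====
def Claim_equal_split_definitions_and_behaviors : Prop := ∀ (code_block : String), Dom_split_definitions_and_behaviors code_block → Spec_split_definitions_and_behaviors code_block (split_definitions_and_behaviors code_block)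

-- ===== LEMMAS AND PROOFS =====

-- the predicate "not a boundary line"
def pvNB (x : String) : Bool := pvKind x = none

-- common reference shape: structural recursion over the suffix of lines starting at a boundary
def pvGB (ls : List String) (fs bs : List String) : List String × List String :=
  match ls with
  | [] => (fs, bs)
  | l :: rest =>
    let block := PySem.Str.join "\n" (l :: rest.takeWhile pvNB)
    if pvKind l = some true then pvGB (rest.dropWhile pvNB) (fs ++ [block]) bs
    else pvGB (rest.dropWhile pvNB) fs (bs ++ [block])
termination_by ls.length
decreasing_by
  all_goals (have := List.length_dropWhile_le pvNB rest; simp; omega)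

theorem pv_tw_take (l : List String) : l.take (l.takeWhile pvNB).length = l.takeWhile pvNB := by
  induction l with
  | nil => rfl
  | cons a l ih => by_cases h : pvNB a <;> simp [h, ih]

theorem pv_tw_drop (l : List String) : l.drop (l.takeWhile pvNB).length = l.dropWhile pvNB := by
  induction l with
  | nil => rfl
  | cons a l ih => by_cases h : pvNB a <;> simp [h, ih]

theorem pvNextBoundary_eq (lines : List String) (j : Nat) :
    pvNextBoundary lines j = j + ((lines.drop j).takeWhile pvNB).length := by
  unfold pvNextBoundary
  split
  · rename_i h
    rw [List.drop_eq_getElem_cons h]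
    by_cases hk : pvKind lines[j] = none
    · have hnb : pvNB lines[j] = true := by simp [pvNB, hk]
      simp only [hk, if_true, List.takeWhile_cons, hnb]
      rw [pvNextBoundary_eq lines (j + 1)]
      simp; omega
    · have hnb : pvNB lines[j] = false := by simp [pvNB, hk]
      simp [hk, hnb]
  · rename_i h
    have : lines.drop j = [] := List.drop_eq_nil_of_le (by omega)
    simp [this]
termination_by lines.length - j

theorem pvNextBoundary_le (lines : List String) (j : Nat) (h : j ≤ lines.length) :
    pvNextBoundary lines j ≤ lines.length := by
  rw [pvNextBoundary_eq]
  have h1 : ((lines.drop j).takeWhile pvNB).length ≤ (lines.drop j).length :=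
    (List.takeWhile_sublist pvNB).length_le
  simp at h1 ⊢
  omega

theorem pvLoopB_eq_gb (lines : List String) (i : Nat) (fs bs : List String)
    (h : i ≤ lines.length) : pvLoopB lines i fs bs = pvGB (lines.drop i) fs bs := by
  rw [pvLoopB]
  split
  · rename_i hi
    have hdrop : lines.drop i = lines[i] :: lines.drop (i + 1) := List.drop_eq_getElem_cons hi
    have hnb := pvNextBoundary_eq lines (i + 1)
    have hle : pvNextBoundary lines (i + 1) ≤ lines.length := pvNextBoundary_le lines (i + 1) (by omega)
    have htake : (lines.drop i).take (pvNextBoundary lines (i + 1) - i)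
        = lines[i] :: (lines.drop (i + 1)).takeWhile pvNB := by
      rw [hdrop, hnb]
      have : i + 1 + ((lines.drop (i + 1)).takeWhile pvNB).length - i
          = ((lines.drop (i + 1)).takeWhile pvNB).length + 1 := by omega
      rw [this, List.take_succ_cons, pv_tw_take]
    have e1 : (lines.drop (i + 1)).drop ((lines.drop (i + 1)).takeWhile pvNB).length
        = lines.drop (i + 1 + ((lines.drop (i + 1)).takeWhile pvNB).length) := by
      rw [List.drop_drop]
    have hdropj : lines.drop (pvNextBoundary lines (i + 1)) = (lines.drop (i + 1)).dropWhile pvNB := by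
      rw [hnb, ← e1, pv_tw_drop]
    have hrec : ∀ fs' bs', pvLoopB lines (pvNextBoundary lines (i + 1)) fs' bs'
        = pvGB ((lines.drop (i + 1)).dropWhile pvNB) fs' bs' := by
      intro fs' bs'
      rw [pvLoopB_eq_gb lines _ fs' bs' hle, hdropj]
    simp only [htake, hrec]
    conv_rhs => rw [hdrop]
    simp only [pvGB]
  · rename_i hi
    have : lines.drop i = [] := List.drop_eq_nil_of_le (by omega)
    rw [this, pvGB]
termination_by lines.length - i
decreasing_by
  have := pvNextBoundary_ge lines (i + 1); omega

-- flush of the final fold state, as A's port does at the end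
def pvFinishA (st : List String × List String × List String × Option Bool) : List String × List String :=
  pvFlushA st.1 st.2.1 st.2.2.1 st.2.2.2

theorem pvFlushA_none (d b cur : List String) : pvFlushA d b cur none = (d, b) := by
  unfold pvFlushA; split <;> rfl

theorem pvFoldA_some (ls : List String) : ∀ (d b cur : List String) (t : Bool), cur ≠ [] →
    pvFinishA (ls.foldl pvStepA (d, b, cur, some t)) =
      pvGB (ls.dropWhile pvNB)
        (if t then d ++ [PySem.Str.join "\n" (cur ++ ls.takeWhile pvNB)] else d)
        (if t then b else b ++ [PySem.Str.join "\n" (cur ++ ls.takeWhile pvNB)]) := by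
  induction ls with
  | nil =>
    intro d b cur t hcur
    cases t <;> simp [pvFinishA, pvFlushA, hcur, pvGB]
  | cons l ls ih =>
    intro d b cur t hcur
    rw [List.foldl_cons]
    by_cases hd : PySem.Str.startswith (PySem.Str.strip l) "def"
    · have hk : pvKind l = some true := by simp only [pvKind]; rw [if_pos hd]
      have hnb : pvNB l = false := by simp [pvNB, hk]
      have hstep : pvStepA (d, b, cur, some t) l =
          ((pvFlushA d b cur (some t)).1, (pvFlushA d b cur (some t)).2, [l], some true) := by
        simp only [pvStepA]; rw [if_pos hd]
      rw [hstep, ih _ _ [l] true (by simp)]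
      cases t <;>
        simp [pvFlushA, hcur, hnb, pvGB, hk]
    · by_cases hb : PySem.Str.startswith (PySem.Str.strip l) "behavior"
      · have hk : pvKind l = some false := by
          simp only [pvKind]; rw [if_neg hd, if_pos hb]
        have hnb : pvNB l = false := by simp [pvNB, hk]
        have hstep : pvStepA (d, b, cur, some t) l =
            ((pvFlushA d b cur (some t)).1, (pvFlushA d b cur (some t)).2, [l], some false) := by
          simp only [pvStepA]; rw [if_neg hd, if_pos hb]
        rw [hstep, ih _ _ [l] false (by simp)]
        cases t <;>
          simp [pvFlushA, hcur, hnb, pvGB, hk]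
      · have hk : pvKind l = none := by
          simp only [pvKind]; rw [if_neg hd, if_neg hb]
        have hnb : pvNB l = true := by simp [pvNB, hk]
        have hstep : pvStepA (d, b, cur, some t) l = (d, b, cur ++ [l], some t) := by
          simp only [pvStepA]; rw [if_neg hd, if_neg hb]
        rw [hstep, ih _ _ (cur ++ [l]) t (by simp)]
        cases t <;> simp [hnb]

theorem pvFoldA_none (ls : List String) : ∀ (d b cur : List String),
    pvFinishA (ls.foldl pvStepA (d, b, cur, none)) = pvGB (ls.dropWhile pvNB) d b := by
  induction ls with
  | nil => intro d b cur; simp [pvFinishA, pvFlushA_none, pvGB]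
  | cons l ls ih =>
    intro d b cur
    rw [List.foldl_cons]
    by_cases hd : PySem.Str.startswith (PySem.Str.strip l) "def"
    · have hk : pvKind l = some true := by simp only [pvKind]; rw [if_pos hd]
      have hnb : pvNB l = false := by simp [pvNB, hk]
      have hstep : pvStepA (d, b, cur, none) l = (d, b, [l], some true) := by
        simp only [pvStepA]; rw [if_pos hd, pvFlushA_none]
      rw [hstep, pvFoldA_some ls d b [l] true (by simp)]
      simp [hnb, pvGB, hk]
    · by_cases hb : PySem.Str.startswith (PySem.Str.strip l) "behavior"
      · have hk : pvKind l = some false := by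
          simp only [pvKind]; rw [if_neg hd, if_pos hb]
        have hnb : pvNB l = false := by simp [pvNB, hk]
        have hstep : pvStepA (d, b, cur, none) l = (d, b, [l], some false) := by
          simp only [pvStepA]; rw [if_neg hd, if_pos hb, pvFlushA_none]
        rw [hstep, pvFoldA_some ls d b [l] false (by simp)]
        simp [hnb, pvGB, hk]
      · have hk : pvKind l = none := by
          simp only [pvKind]; rw [if_neg hd, if_neg hb]
        have hnb : pvNB l = true := by simp [pvNB, hk]
        have hstep : pvStepA (d, b, cur, none) l = (d, b, cur ++ [l], none) := by
          simp only [pvStepA]; rw [if_neg hd, if_neg hb]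
        rw [hstep, ih d b (cur ++ [l])]
        simp [hnb]

-- ===== VERDICT (by name: the statement is the Claim_ definition above) =====
theorem split_definitions_and_behaviors_spec : Claim_equal_split_definitions_and_behaviors := by
  intro code_block _
  unfold Spec_split_definitions_and_behaviors
  unfold split_definitions_and_behaviors split_definitions_and_behaviors_alt
  have hA := pvFoldA_none (PySem.Str.splitlines code_block) [] [] []
  have hB : pvLoopB (PySem.Str.splitlines code_block)
      (pvNextBoundary (PySem.Str.splitlines code_block) 0) [] []
      = pvGB ((PySem.Str.splitlines code_block).dropWhile pvNB) [] [] := by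
    rw [pvLoopB_eq_gb _ _ [] [] (pvNextBoundary_le _ 0 (by omega))]
    rw [pvNextBoundary_eq]
    simp [pv_tw_drop]
  simp only [pvFinishA] at hA
  simp only [hB, ← hA]
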